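-- pv_equiv track=rewrite | github.com/Manna-na/algorithm-study | 프로그래머스/2/42586. 기능개발/기능개발.py | solution
-- ===== SOURCE A (Python) =====
-- import math
--
-- def solution(progresses, speeds):
--     answer = []
--     new = []
--     for p,s in zip(progresses, speeds):
--         new.append(int(math.ceil((100-p)/s)))
--     stack = [new[0]]
--     for i in range(1, len(new)):
--         if stack[0] >= new[i]:
--             stack.append(new[i])
--         else:
--             answer.append(len(stack))
--             stack = [new[i]]
--
--     answer.append(len(stack))
--     return answer
-- ===== SOURCE B (Python) =====
-- def solution(progresses, speeds):
--     # per-feature completion days (exact ceiling division; raises like A: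
--     # ZeroDivisionError on a zero speed)
--     days = [-(-(100 - p) // s) for p, s in zip(progresses, speeds)]
--
--     # recursion over groups: the feature at index i is a group leader; scan
--     # ahead for the first feature taking longer than it, emit that group's
--     # length and recurse on the rest (IndexError via days[0] on empty input,
--     # matching A).
--     def groups(i):
--         lead = days[i]
--         j = i + 1
--         while j < len(days) and days[j] <= lead:
--             j += 1
--         if j == len(days):
--             return [j - i]
--         return [j - i] + groups(j)
--
--     return groups(0)
-- ===== Notes on version B (the rewrite author's own statement) =====
-- stated objective: alternative
-- what changed: Replaces the single-pass grouping stack by recursion over groups: each step takes the current group leader, scans ahead with an inner loop for the first feature whose completion days exceed it, emits that group's length, and recurses on the rest; completion days use exact integer ceiling division instead of float ceil.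
import Mathlib
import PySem

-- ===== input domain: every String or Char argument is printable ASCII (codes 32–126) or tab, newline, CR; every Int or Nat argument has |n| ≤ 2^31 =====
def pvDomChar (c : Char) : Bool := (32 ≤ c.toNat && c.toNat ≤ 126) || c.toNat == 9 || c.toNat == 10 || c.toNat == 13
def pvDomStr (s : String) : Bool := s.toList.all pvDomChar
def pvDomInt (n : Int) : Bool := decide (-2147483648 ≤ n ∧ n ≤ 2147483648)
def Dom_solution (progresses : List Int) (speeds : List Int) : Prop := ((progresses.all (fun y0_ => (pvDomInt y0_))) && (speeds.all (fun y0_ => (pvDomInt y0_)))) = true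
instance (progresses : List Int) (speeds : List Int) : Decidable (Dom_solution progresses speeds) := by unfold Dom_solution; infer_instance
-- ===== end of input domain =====

-- B replaces A's single-pass grouping stack by recursion over groups, each step scanning
-- ahead for the first completion time exceeding the current leader (objective: alternative
-- decomposition, same O(n) cost).

-- ===== PORT A =====
-- completion days: int(math.ceil((100-p)/s)) = -((-(100-p)) // s); exact on the stated
-- domain (|ints| ≤ 2^31), where the float division cannot round across an integer
def pvDays (progresses : List Int) (speeds : List Int) : List Int :=
  (progresses.zip speeds).map (fun ps => -(PySem.Int.floordiv (-(100 - ps.1)) ps.2))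

-- one step of A's 'for i in range(1, len(new))' loop; state = (stack, answer)
def pvStepA (new : List Int) (st : List Int × List Int) (i : Int) : List Int × List Int :=
  let ni := PySem.List.pyGetD new i 0
  if st.1.headI ≥ ni then (st.1 ++ [ni], st.2)
  else ([ni], st.2 ++ [(st.1.length : Int)])

def solution (progresses : List Int) (speeds : List Int) : List Int :=
  let new := pvDays progresses speeds
  -- new[0]: IndexError on empty zip is excluded by Pre_solution
  let first := PySem.List.pyGetD new 0 0
  let st := (PySem.List.pyRange 1 (new.length : Int) 1).foldl (pvStepA new) ([first], [])
  st.2 ++ [(st.1.length : Int)]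

-- ===== PORT B =====
-- Source B's inner 'while j < len(days) and days[j] <= lead: j += 1'
def pvEnd (days : List Int) (lead : Int) (j : Nat) : Nat :=
  if h : j < days.length ∧ PySem.List.pyGetD days (j : Int) 0 ≤ lead then
    pvEnd days lead (j + 1)
  else j
termination_by days.length - j
decreasing_by omega

-- Source B's recursive 'groups(i)'; fuel only makes the recursion total (each real call has
-- j > i, and solution_alt supplies fuel = days.length, enough within Pre_solution)
def pvGroups (days : List Int) (fuel i : Nat) : List Int :=
  match fuel with
  | 0 => []
  | f + 1 =>
    let lead := PySem.List.pyGetD days (i : Int) 0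
    let j := pvEnd days lead (i + 1)
    if j = days.length then [(j : Int) - (i : Int)]
    else ((j : Int) - (i : Int)) :: pvGroups days f j

def solution_alt (progresses : List Int) (speeds : List Int) : List Int :=
  let days := pvDays progresses speeds
  pvGroups days days.length 0

-- ===== PRECONDITION & SPEC =====
-- A raises IndexError (new[0]) when zip(progresses, speeds) is empty and ZeroDivisionError
-- when a used speed is 0; exactly those inputs are excluded.
def Pre_solution (progresses : List Int) (speeds : List Int) : Prop :=
  progresses.zip speeds ≠ [] ∧ ∀ ps ∈ progresses.zip speeds, ps.2 ≠ 0
instance (progresses : List Int) (speeds : List Int) : Decidable (Pre_solution progresses speeds) := by unfold Pre_solution; infer_instance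
def pvWitness_solution : List Int × List Int := ([30, 30, 95], [30, 1, 5])

def Spec_solution (progresses : List Int) (speeds : List Int) (out : List Int) : Prop := out = solution_alt progresses speeds
instance (progresses : List Int) (speeds : List Int) (out : List Int) : Decidable (Spec_solution progresses speeds out) := by unfold Spec_solution; infer_instance

-- ===== CLAIM (what is proved, stated in full; the proofs are below) =====
def Claim_equal_solution : Prop := ∀ (progresses : List Int) (speeds : List Int), Dom_solution progresses speeds → Pre_solution progresses speeds → Spec_solution progresses speeds (solution progresses speeds)

-- ===== LEMMAS AND PROOFS =====

theorem pvEnd_stop (days : List Int) (lead : Int) (j : Nat)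
    (h : ¬(j < days.length ∧ PySem.List.pyGetD days (j : Int) 0 ≤ lead)) :
    pvEnd days lead j = j := by
  rw [pvEnd, dif_neg h]

theorem pvEnd_skip (days : List Int) (lead : Int) :
    ∀ (m j0 : Nat),
      (∀ k, j0 ≤ k → k < j0 + m → k < days.length ∧ PySem.List.pyGetD days (k : Int) 0 ≤ lead) →
      pvEnd days lead j0 = pvEnd days lead (j0 + m) := by
  intro m
  induction m with
  | zero => intro j0 _; rfl
  | succ m ih =>
    intro j0 hk
    have h0 := hk j0 le_rfl (by omega)
    rw [pvEnd, dif_pos h0]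
    have := ih (j0 + 1) (fun k hk1 hk2 => hk k (by omega) (by omega))
    rw [this]; ring_nf

-- joint invariant: A's stack is the current group; its head is the group leader
-- days[start], its length is j - start, and every already-scanned member is ≤ the leader.
theorem pvA_eq (days : List Int) :
    ∀ (m fuel j start : Nat) (stack answer : List Int),
      days.length = j + m →
      m + 1 ≤ fuel →
      stack ≠ [] →
      stack.headI = PySem.List.pyGetD days (start : Int) 0 →
      start + stack.length = j →
      (∀ k, start < k → k < j →
        k < days.length ∧ PySem.List.pyGetD days (k : Int) 0 ≤ stack.headI) →
      (let st := (PySem.List.pyRange (j : Int) (days.length : Int) 1).foldl (pvStepA days) (stack, answer);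
       st.2 ++ [(st.1.length : Int)]) = answer ++ pvGroups days fuel start := by
  intro m
  induction m with
  | zero =>
    intro fuel j start stack answer hlen hfuel hne hhead hL hscan
    obtain ⟨f, rfl⟩ : ∃ f, fuel = f + 1 := ⟨fuel - 1, by omega⟩
    rw [PySem.List.pyRange_one_eq_nil (by omega)]
    simp only [List.foldl_nil]
    have hstart : start + 1 ≤ days.length := by
      have := List.length_pos_iff.mpr hne; omega
    have hend : pvEnd days (PySem.List.pyGetD days (start : Int) 0) (start + 1) = days.length := by
      have hskip := pvEnd_skip days (PySem.List.pyGetD days (start : Int) 0)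
        (days.length - (start + 1)) (start + 1)
        (fun k h1 h2 => by
          have := hscan k (by omega) (by omega)
          rw [hhead] at this; exact ⟨by omega, this.2⟩)
      have : start + 1 + (days.length - (start + 1)) = days.length := by omega
      rw [this] at hskip
      rw [hskip, pvEnd_stop days _ days.length (by omega)]
    have hcast : ((days.length : Int)) - (start : Int) = (stack.length : Int) := by
      omega
    simp only [pvGroups, hend, hcast]
    simp
  | succ m ih =>
    intro fuel j start stack answer hlen hfuel hne hhead hL hscan
    obtain ⟨f, rfl⟩ : ∃ f, fuel = f + 1 := ⟨fuel - 1, by omega⟩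
    obtain ⟨a, t, rfl⟩ := List.exists_cons_of_ne_nil hne
    rw [PySem.List.pyRange_one_cons (by omega)]
    simp only [List.foldl_cons]
    have hcast : ((j : Int) + 1) = ((j + 1 : Nat) : Int) := by push_cast; ring
    have hjlt : j < days.length := by omega
    by_cases h : PySem.List.pyGetD days (j : Int) 0 ≤ (a :: t).headI
    · -- same group: A pushes onto the stack, B's scan will step over index j
      have hA : pvStepA days (a :: t, answer) (j : Int)
          = (a :: t ++ [PySem.List.pyGetD days (j : Int) 0], answer) := by
        simp only [pvStepA]
        rw [if_pos (by simpa using h)]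
      rw [hA, hcast]
      refine ih (f + 1) (j + 1) start _ _ (by omega) (by omega) (by simp)
        (by simpa using hhead) (by simp at hL ⊢; omega) ?_
      intro k hk1 hk2
      by_cases hkj : k < j
      · have := hscan k hk1 hkj
        exact ⟨this.1, by simpa using this.2⟩
      · have : k = j := by omega
        subst this
        exact ⟨hjlt, by simpa using h⟩
    · -- new record: A flushes the stack, B's scan stops at j and the group is emitted
      rw [not_le] at h
      have hA : pvStepA days (a :: t, answer) (j : Int)
          = ([PySem.List.pyGetD days (j : Int) 0],
             answer ++ [((a :: t).length : Int)]) := by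
        simp only [pvStepA]
        rw [if_neg (by simpa using not_le.mpr h)]
      rw [hA, hcast]
      have hrec := ih f (j + 1) j [PySem.List.pyGetD days (j : Int) 0]
        (answer ++ [((a :: t).length : Int)])
        (by omega) (by omega) (by simp) (by simp) (by simp) (by intro k h1 h2; omega)
      rw [hrec]
      -- now: answer ++ [len] ++ pvGroups f j = answer ++ pvGroups (f+1) start
      have hend : pvEnd days (PySem.List.pyGetD days (start : Int) 0) (start + 1) = j := by
        have hstart1 : start + 1 ≤ j := by
          have := List.length_pos_iff.mpr hne
          simp at hL; omega
        have hskip := pvEnd_skip days (PySem.List.pyGetD days (start : Int) 0)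
          (j - (start + 1)) (start + 1)
          (fun k h1 h2 => by
            have := hscan k (by omega) (by omega)
            rw [hhead] at this; exact ⟨this.1, this.2⟩)
        have heq : start + 1 + (j - (start + 1)) = j := by omega
        rw [heq] at hskip
        rw [hskip, pvEnd_stop days _ j (by rw [← hhead]; omega)]
      have hjne : j ≠ days.length := by omega
      simp only [pvGroups, hend, if_neg hjne]
      have hlenint : ((j : Int) - (start : Int)) = (((a :: t).length : Nat) : Int) := by
        simp at hL ⊢; omega
      rw [hlenint]
      simp
-- ===== VERDICT (by name: the statement is the Claim_ definition above) =====
theorem solution_spec : Claim_equal_solution := by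
  intro progresses speeds _ hpre
  unfold Spec_solution solution solution_alt
  have hdnz : pvDays progresses speeds ≠ [] := by
    unfold pvDays
    simpa using hpre.1
  have hlen : 1 ≤ (pvDays progresses speeds).length := List.length_pos_iff.mpr hdnz
  have := pvA_eq (pvDays progresses speeds) ((pvDays progresses speeds).length - 1)
      (pvDays progresses speeds).length 1 0
      [PySem.List.pyGetD (pvDays progresses speeds) 0 0] []
      (by omega) (by omega) (by simp) (by simp) (by simp) (by intro k h1 h2; omega)
  simpa using this
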